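-- pv_equiv track=rewrite | github.com/cyctjdghks/Algorithm_Study | 프로그래머스/44주차/표현 가능한 이진트리/전승원.py | dfs
-- ===== SOURCE A (Python) =====
-- def dfs(x, n, s):
--     if n == -1: return True
--
--     l, r = x - 2**n, x + 2**n
--
--     if (s[x] == '0' and s[l] == '1') or (s[x] == '0' and s[r] == '1'):
--         return False
--
--     res1 = dfs(l, n-1, s)
--     res2 = dfs(r, n-1, s)
--
--     if res1 and res2:
--         return True
--     return False
-- ===== SOURCE B (Python) =====
-- def dfs(x, n, s):
--     stack = [(x, n)]
--     while stack:
--         cx, cn = stack.pop()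
--         if cn == -1:
--             continue
--         l, r = cx - 2**cn, cx + 2**cn
--         if s[cx] == '0' and (s[l] == '1' or s[r] == '1'):
--             return False
--         stack.append((l, cn - 1))
--         stack.append((r, cn - 1))
--     return True
-- ===== Notes on version B (the rewrite author's own statement) =====
-- stated objective: alternative
-- what changed: The recursive tree walk is replaced by an iterative loop over an explicit stack of (index, level) pairs, removing recursion entirely while keeping the exact read pattern (children are read only when the node's bit is '0').
-- outside the precondition, e.g. on dfs(0, 0, '1'): A returns True, B returns True
import Mathlib
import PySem

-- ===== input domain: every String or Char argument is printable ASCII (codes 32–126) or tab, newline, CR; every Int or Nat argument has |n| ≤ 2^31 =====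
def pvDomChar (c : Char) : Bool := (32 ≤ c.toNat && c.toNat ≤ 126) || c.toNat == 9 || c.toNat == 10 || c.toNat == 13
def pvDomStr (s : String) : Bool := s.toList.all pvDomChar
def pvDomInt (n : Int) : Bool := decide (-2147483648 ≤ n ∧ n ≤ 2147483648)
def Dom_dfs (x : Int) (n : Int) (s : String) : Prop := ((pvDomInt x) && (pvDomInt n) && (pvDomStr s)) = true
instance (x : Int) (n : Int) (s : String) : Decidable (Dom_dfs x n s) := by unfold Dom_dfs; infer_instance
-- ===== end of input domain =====

-- B replaces A's recursion by an explicit-stack loop (same reads, same result); equivalence proved on Pre_dfs.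

-- ===== PORT A =====
-- A recurses with n decreasing by 1 until n = -1; fuel (n+1).toNat counts exactly those levels.
def dfsAuxA (fuel : Nat) (x : Int) (n : Int) (s : String) : Bool :=
  if n = -1 then true
  else
    match fuel with
    | 0 => true  -- unreachable for n ≥ 0 when fuel = (n+1).toNat; Python raises for n < -1 (outside Pre_)
    | fuel' + 1 =>
      let l := x - 2 ^ n.toNat
      let r := x + 2 ^ n.toNat
      if (PySem.Str.pyGet? s x == some '0' && PySem.Str.pyGet? s l == some '1')
          || (PySem.Str.pyGet? s x == some '0' && PySem.Str.pyGet? s r == some '1') then false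
      else
        let res1 := dfsAuxA fuel' l (n - 1) s
        let res2 := dfsAuxA fuel' r (n - 1) s
        if res1 && res2 then true else false

def dfs (x : Int) (n : Int) (s : String) : Bool := dfsAuxA (n + 1).toNat x n s

-- ===== PORT B =====
def dfsLoop (s : String) : List (Int × Int) → Bool
  | [] => true
  | (cx, cn) :: rest =>
    if cn = -1 then dfsLoop s rest
    else if cn < -1 then false  -- totality guard only: Python B raises TypeError here (outside Pre_)
    else
      let l := cx - 2 ^ cn.toNat
      let r := cx + 2 ^ cn.toNat
      if PySem.Str.pyGet? s cx == some '0'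
          && (PySem.Str.pyGet? s l == some '1' || PySem.Str.pyGet? s r == some '1') then false
      else dfsLoop s ((r, cn - 1) :: (l, cn - 1) :: rest)
termination_by stack => (stack.map (fun p => 3 ^ ((p.2 + 1).toNat))).sum
decreasing_by
  · simp only [List.map_cons, List.sum_cons]
    have : 0 < 3 ^ ((cn + 1).toNat) := pow_pos (by norm_num) _
    omega
  · simp only [List.map_cons, List.sum_cons]
    have h1 : (cn + 1).toNat = cn.toNat + 1 := by omega
    have h2 : (cn - 1 + 1).toNat = cn.toNat := by omega
    have h3 : 0 < 3 ^ cn.toNat := pow_pos (by norm_num) _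
    rw [h1, h2, pow_succ]
    omega

def dfs_alt (x : Int) (n : Int) (s : String) : Bool := dfsLoop s [(x, n)]

-- ===== PRECONDITION & SPEC =====
-- Pre_dfs requires n ≥ -1 (Python A raises TypeError for n < -1) and, for n ≥ 0, that the whole
-- tree's index envelope [x-(2^(n+1)-1), x+(2^(n+1)-1)] lies within Python's valid index range
-- [-len(s), len(s)).  This excludes some inputs on which A still returns (reads outside the
-- envelope's valid part that are skipped by value-dependent short-circuiting), because there
-- whether A returns or raises IndexError cannot be stated in closed form.
def Pre_dfs (x : Int) (n : Int) (s : String) : Prop :=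
  n = -1 ∨ (0 ≤ n ∧ -(s.toList.length : Int) ≤ x - (2 ^ (n.toNat + 1) - 1)
            ∧ x + (2 ^ (n.toNat + 1) - 1) < (s.toList.length : Int))
instance (x : Int) (n : Int) (s : String) : Decidable (Pre_dfs x n s) := by
  unfold Pre_dfs; infer_instance

def pvWitness_dfs : Int × Int × String := (3, 1, "0110111")

def Spec_dfs (x : Int) (n : Int) (s : String) (out : Bool) : Prop := out = dfs_alt x n s
instance (x : Int) (n : Int) (s : String) (out : Bool) : Decidable (Spec_dfs x n s out) := by
  unfold Spec_dfs; infer_instance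

-- ===== CLAIM (what is proved, stated in full; the proofs are below) =====
def Claim_equal_dfs : Prop := ∀ (x : Int) (n : Int) (s : String), Dom_dfs x n s → Pre_dfs x n s → Spec_dfs x n s (dfs x n s)

-- ===== LEMMAS AND PROOFS =====

-- The stack loop computes the conjunction of A's recursive check over the stack's entries.
lemma dfsLoop_eq_all (s : String) (stack : List (Int × Int))
    (h : ∀ p ∈ stack, (-1 : Int) ≤ p.2) :
    dfsLoop s stack = stack.all (fun p => dfsAuxA (p.2 + 1).toNat p.1 p.2 s) := by
  induction stack using dfsLoop.induct s with
  | case1 => simp [dfsLoop]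
  | case2 cx rest ih =>
    have hrest : ∀ p ∈ rest, (-1 : Int) ≤ p.2 := fun p hp => h p (List.mem_cons_of_mem _ hp)
    rw [dfsLoop]
    simp [ih hrest, dfsAuxA]
  | case3 cx cn rest hcn hlt =>
    exact absurd (h (cx, cn) List.mem_cons_self) (by simpa using hlt)
  | case4 cx cn rest hcn hlt l r hcond =>
    have hge : (0 : Int) ≤ cn := by omega
    have hfuel : (cn + 1).toNat = cn.toNat + 1 := by omega
    rw [dfsLoop]
    simp only [hcn, if_false, if_neg hlt]
    simp only [List.all_cons, hfuel, dfsAuxA, hcn]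
    -- A's condition is boolean-equal to B's condition, which holds here
    cases h0 : (PySem.Str.pyGet? s cx == some '0') <;>
      cases h1 : (PySem.Str.pyGet? s (cx - 2 ^ cn.toNat) == some '1') <;>
      cases h2 : (PySem.Str.pyGet? s (cx + 2 ^ cn.toNat) == some '1') <;>
      simp_all [l, r]
  | case5 cx cn rest hcn hlt l r hcond ih =>
    have hge : (0 : Int) ≤ cn := by omega
    have hfuel : (cn + 1).toNat = cn.toNat + 1 := by omega
    have hchild : (cn - 1 + 1).toNat = cn.toNat := by omega
    have hrest : ∀ p ∈ ((r, cn - 1) :: (l, cn - 1) :: rest), (-1 : Int) ≤ p.2 := by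
      intro p hp
      rcases hp with _ | ⟨_, hp⟩
      · simp; omega
      · rcases hp with _ | ⟨_, hp⟩
        · simp; omega
        · exact h p (List.mem_cons_of_mem _ hp)
    rw [dfsLoop]
    simp only [hcn, if_false, if_neg hlt]
    rw [ih hrest]
    simp only [List.all_cons, hchild, hfuel, dfsAuxA, hcn]
    cases h0 : (PySem.Str.pyGet? s cx == some '0') <;>
      cases h1 : (PySem.Str.pyGet? s (cx - 2 ^ cn.toNat) == some '1') <;>
      cases h2 : (PySem.Str.pyGet? s (cx + 2 ^ cn.toNat) == some '1') <;>
      simp_all [l, r] <;>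
      cases dfsAuxA cn.toNat (cx - 2 ^ cn.toNat) (cn - 1) s <;>
      cases dfsAuxA cn.toNat (cx + 2 ^ cn.toNat) (cn - 1) s <;> simp_all

-- ===== VERDICT (by name: the statement is the Claim_ definition above) =====
theorem dfs_spec : Claim_equal_dfs := by
  intro x n s _ hpre
  unfold Spec_dfs dfs dfs_alt
  have hn : (-1 : Int) ≤ n := by rcases hpre with h | ⟨h, _⟩ <;> omega
  rw [dfsLoop_eq_all s [(x, n)] (by simpa using hn)]
  simp
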